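-- pv_equiv track=rewrite | github.com/slavak9/python-test-project | project_sites/media_site/add_content/post_control.py | video
-- ===== SOURCE A (Python) =====
-- def video(value):
--     video_list = ['.mp4', '.mov', '.m4v', '.m2v', '.avi', '.wmv', '.rm', '.mpeg', '.mpg', '.ogv', '.3gp', '.3g2',
--                   '.vob', '.flv', '.webm', '.mkv']
--     str_value = str(value).lower()
--     for i in video_list:
--         if i in str_value and str_value[len(str_value) - len(i):] == i:
--             return True
--     return False
-- ===== SOURCE B (Python) =====
-- def video(value):
--     str_value = str(value).lower()
--     idx = str_value.rfind('.')
--     if idx == -1: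
--         return False
--     return str_value[idx:] in {'.mp4', '.mov', '.m4v', '.m2v', '.avi', '.wmv', '.rm', '.mpeg', '.mpg',
--                                '.ogv', '.3gp', '.3g2', '.vob', '.flv', '.webm', '.mkv'}
-- ===== Notes on version B (the rewrite author's own statement) =====
-- stated objective: idiomatic
-- what changed: Instead of scanning all 16 extensions testing substring-containment and a suffix slice for each, B extracts the suffix from the last dot (rfind) once and tests membership in a set literal of the 16 extensions.
import Mathlib
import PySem

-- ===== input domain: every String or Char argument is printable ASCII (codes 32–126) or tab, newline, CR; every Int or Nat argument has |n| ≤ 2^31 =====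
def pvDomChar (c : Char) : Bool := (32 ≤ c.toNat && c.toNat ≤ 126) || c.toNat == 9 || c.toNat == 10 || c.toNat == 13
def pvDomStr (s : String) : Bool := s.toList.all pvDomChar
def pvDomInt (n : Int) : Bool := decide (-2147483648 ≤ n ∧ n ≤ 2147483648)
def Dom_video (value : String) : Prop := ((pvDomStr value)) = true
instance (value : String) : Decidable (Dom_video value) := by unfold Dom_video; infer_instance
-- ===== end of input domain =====

-- B replaces A's scan over all 16 extensions (substring test + suffix slice each) by one
-- rfind('.') suffix extraction and a single set-membership test (objective: idiomatic).

-- ===== PORT A =====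
def videoExts : List (List Char) :=
  [".mp4".toList, ".mov".toList, ".m4v".toList, ".m2v".toList, ".avi".toList, ".wmv".toList,
   ".rm".toList, ".mpeg".toList, ".mpg".toList, ".ogv".toList, ".3gp".toList, ".3g2".toList,
   ".vob".toList, ".flv".toList, ".webm".toList, ".mkv".toList]

-- the 'for i in video_list: if i in str_value and str_value[len(str_value)-len(i):] == i: return True'
def videoLoop (sv : List Char) : List (List Char) → Bool
  | [] => false
  | i :: rest =>
    if PySem.Chars.isIn i sv
        && (PySem.Chars.slice sv (some ((sv.length : Int) - (i.length : Int))) none == i) then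
      true
    else videoLoop sv rest

def video (value : String) : Bool :=
  videoLoop (PySem.Chars.lower value.toList) videoExts

-- ===== PORT B =====
def videoSet : PySem.Set (List Char) :=
  PySem.Set.ofList
    [".mp4".toList, ".mov".toList, ".m4v".toList, ".m2v".toList, ".avi".toList, ".wmv".toList,
     ".rm".toList, ".mpeg".toList, ".mpg".toList, ".ogv".toList, ".3gp".toList, ".3g2".toList,
     ".vob".toList, ".flv".toList, ".webm".toList, ".mkv".toList]

def video_alt (value : String) : Bool :=
  let s := PySem.Chars.lower value.toList
  let idx := PySem.Chars.rfind s ['.']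
  if idx == -1 then false
  else PySem.Set.contains videoSet (PySem.Chars.slice s (some idx) none)

-- ===== PRECONDITION & SPEC =====
def Spec_video (value : String) (out : Bool) : Prop := out = video_alt value
instance (value : String) (out : Bool) : Decidable (Spec_video value out) := by unfold Spec_video; infer_instance

-- ===== CLAIM (what is proved, stated in full; the proofs are below) =====
def Claim_equal_video : Prop := ∀ (value : String), Dom_video value → Spec_video value (video value)

-- ===== LEMMAS AND PROOFS =====

-- [c].isPrefixOf xs just reads the head.
theorem prefixSingleton (c : Char) (xs : List Char) :
    List.isPrefixOf [c] xs = true ↔ xs.head? = some c := by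
  rw [List.isPrefixOf_iff_prefix]; cases xs <;> simp [eq_comm]

-- A's per-extension test ('i in sv' and the length-difference slice equals i) is exactly "i is a suffix of sv".
theorem videoCond_eq_suffix (e l : List Char) :
    (PySem.Chars.isIn e l
      && (PySem.Chars.slice l (some ((l.length : Int) - (e.length : Int))) none == e))
      = decide (e <:+ l) := by
  by_cases hs : e <:+ l
  · have hlen : e.length ≤ l.length := hs.length_le
    have hc : ((l.length : Int) - (e.length : Int)) = ((l.length - e.length : Nat) : Int) := by omega
    have hsl : PySem.Chars.slice l (some ((l.length : Int) - (e.length : Int))) none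
        = l.drop (l.length - e.length) := by rw [hc]; simp [pysem]
    have hd : l.drop (l.length - e.length) = e := ((List.suffix_iff_eq_drop).1 hs).symm
    have hin : PySem.Chars.isIn e l = true := (PySem.Chars.isIn_iff_infix _ _).2 hs.isInfix
    rw [hsl, hd, hin]; simp [hs]
  · have h2 : ¬ PySem.List.slice l (some ((l.length : Int) - (e.length : Int))) none = e := by
      intro hEq
      by_cases h : e.length ≤ l.length
      · apply hs
        have hc : ((l.length : Int) - (e.length : Int)) = ((l.length - e.length : Nat) : Int) := by omega
        rw [hc, PySem.List.slice_from_natCast] at hEq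
        rw [List.suffix_iff_eq_drop]
        exact hEq.symm
      · have hlen : (PySem.List.slice l (some ((l.length : Int) - (e.length : Int))) none).length
            ≤ l.length := by
          rw [PySem.List.slice_some_none]
          simp
        rw [hEq] at hlen
        omega
    simp [hs, h2]

-- rfind.go s [c] j is the largest index i ≤ j with s[i]? = some c, or -1 if there is none.
theorem rfindGo_spec (s : List Char) (c : Char) (j : Nat) :
    (PySem.Chars.rfind.go s [c] j = -1 ∧ ∀ i : Nat, i ≤ j → s[i]? ≠ some c) ∨
    (∃ i : Nat, i ≤ j ∧ PySem.Chars.rfind.go s [c] j = (i : Int) ∧ s[i]? = some c ∧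
      ∀ i' : Nat, i < i' → i' ≤ j → s[i']? ≠ some c) := by
  induction j with
  | zero =>
    have h0 : PySem.Chars.rfind.go s [c] 0 = if List.isPrefixOf [c] s then 0 else -1 := by
      simp [PySem.Chars.rfind.go]
    by_cases hp : List.isPrefixOf [c] s = true
    · right
      refine ⟨0, le_refl 0, by rw [h0, if_pos hp]; norm_num, ?_, by omega⟩
      have := (prefixSingleton c s).1 hp
      rwa [← List.head?_drop, List.drop_zero]
    · left
      refine ⟨by rw [h0, if_neg hp], ?_⟩
      intro i hi hc
      have hi0 : i = 0 := by omega
      subst hi0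
      rw [← List.head?_drop, List.drop_zero] at hc
      exact hp ((prefixSingleton c s).2 hc)
  | succ j ih =>
    have hstep : PySem.Chars.rfind.go s [c] (j+1)
        = if List.isPrefixOf [c] (s.drop (j+1)) then ((j : Int)+1) else PySem.Chars.rfind.go s [c] j := by
      simp [PySem.Chars.rfind.go]
    by_cases hp : List.isPrefixOf [c] (s.drop (j+1)) = true
    · right
      refine ⟨j+1, le_refl _, ?_, ?_, by omega⟩
      · rw [hstep, if_pos hp]; push_cast; ring
      · have := (prefixSingleton c _).1 hp
        rwa [List.head?_drop] at this
    · have hnot : s[j+1]? ≠ some c := by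
        intro hc
        exact hp ((prefixSingleton c _).2 (by rwa [List.head?_drop]))
      rcases ih with ⟨hgo, hn⟩ | ⟨i, hij, hgo, hi, hmax⟩
      · left
        refine ⟨by rw [hstep, if_neg hp]; exact hgo, ?_⟩
        intro i hi
        by_cases h : i ≤ j
        · exact hn i h
        · have : i = j+1 := by omega
          subst this; exact hnot
      · right
        refine ⟨i, by omega, by rw [hstep, if_neg hp]; exact hgo, hi, ?_⟩
        intro i' h1 h2
        by_cases h : i' ≤ j
        · exact hmax i' h1 h
        · have : i' = j+1 := by omega
          subst this; exact hnot

theorem videoExts_shape : ∀ e ∈ videoExts, e.head? = some '.' ∧ '.' ∉ e.tail := by decide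

theorem videoLoop_eq_any (l : List Char) (exts : List (List Char)) :
    videoLoop l exts = exts.any (fun e => decide (e <:+ l)) := by
  induction exts with
  | nil => rfl
  | cons e rest ih =>
    simp only [videoLoop, videoCond_eq_suffix, List.any_cons, ih]
    by_cases h : e <:+ l <;> simp [h]

theorem videoSet_contains_iff (x : List Char) :
    PySem.Set.contains videoSet x = true ↔ x ∈ videoExts := by
  have h1 : PySem.Set.contains videoSet x = true ↔ x ∈ videoSet := by
    simp [PySem.Set.contains]
  rw [h1, show videoSet = PySem.Set.ofList videoExts from rfl]
  exact PySem.Set.mem_ofList videoExts x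

-- a suffix from videoExts puts a '.' at position l.length - e.length, and nowhere later
theorem suffix_dot_pos (e l : List Char) (he : e ∈ videoExts) (hsuf : e <:+ l) :
    l[l.length - e.length]? = some '.' := by
  have hd : l.drop (l.length - e.length) = e := ((List.suffix_iff_eq_drop).1 hsuf).symm
  rw [← List.head?_drop, hd]
  exact (videoExts_shape e he).1

theorem video_main (l : List Char) :
    videoLoop l videoExts =
      (if (PySem.Chars.rfind l ['.']) == -1 then false
       else PySem.Set.contains videoSet (PySem.Chars.slice l (some (PySem.Chars.rfind l ['.'])) none)) := by
  rw [videoLoop_eq_any]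
  have hr : PySem.Chars.rfind l ['.'] = PySem.Chars.rfind.go l ['.'] l.length := rfl
  rcases rfindGo_spec l '.' l.length with ⟨hgo, hnone⟩ | ⟨i, hin, hgo, hi, hmax⟩
  · rw [hr, hgo]
    rw [if_pos (by decide)]
    rw [List.any_eq_false]
    intro e he
    simp only [decide_eq_true_eq]
    intro hsuf
    exact hnone _ (by omega) (suffix_dot_pos e l he hsuf)
  · rw [hr, hgo]
    have hne : ((i : Int) == -1) = false := by rw [beq_eq_false_iff_ne]; omega
    rw [hne, if_neg (by simp)]
    have hsl : PySem.Chars.slice l (some (i : Int)) none = l.drop i := by simp [pysem]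
    rw [hsl]
    by_cases hmem : l.drop i ∈ videoExts
    · rw [(videoSet_contains_iff _).2 hmem, List.any_eq_true]
      exact ⟨l.drop i, hmem, by simp [List.drop_suffix]⟩
    · have h1 : PySem.Set.contains videoSet (l.drop i) = false := by
        rw [Bool.eq_false_iff]
        intro h; exact hmem ((videoSet_contains_iff _).1 h)
      rw [h1, List.any_eq_false]
      intro e he
      simp only [decide_eq_true_eq]
      intro hsuf
      have hd : l.drop (l.length - e.length) = e := ((List.suffix_iff_eq_drop).1 hsuf).symm
      have hm : l[l.length - e.length]? = some '.' := suffix_dot_pos e l he hsuf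
      obtain ⟨hhd, htl⟩ := videoExts_shape e he
      -- the rfind index i is exactly l.length - e.length
      have h1' : l.length - e.length ≤ i := by
        by_contra h
        exact hmax (l.length - e.length) (by omega) (by omega) hm
      have h2' : i ≤ l.length - e.length := by
        by_contra h
        -- i lies strictly inside e's tail, which has no '.'
        obtain ⟨a, t, het⟩ : ∃ a t, e = a :: t := by
          cases e with
          | nil => simp at hhd
          | cons a t => exact ⟨a, t, rfl⟩
        have hgi : l[i]? = e[i - (l.length - e.length)]? := by
          conv_lhs =>
            rw [show i = (l.length - e.length) + (i - (l.length - e.length)) by omega,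
              ← List.getElem?_drop, hd]
        rw [show i - (l.length - e.length) = (i - (l.length - e.length) - 1) + 1 from by omega,
          het, List.getElem?_cons_succ] at hgi
        rw [hgi] at hi
        rw [het] at htl
        simp only [List.tail_cons] at htl
        exact htl (List.mem_of_getElem? hi)
      have hieq : i = l.length - e.length := by omega
      exact hmem (by rw [hieq, hd]; exact he)

-- ===== VERDICT (by name: the statement is the Claim_ definition above) =====
theorem video_spec : Claim_equal_video := by
  intro value _
  unfold Spec_video video video_alt
  exact video_main (PySem.Chars.lower value.toList)
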